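-- pv_equiv track=rewrite | github.com/oTree-org/oTree | checks/templates.py | split_source_lines
-- ===== SOURCE A (Python) =====
-- from collections import namedtuple
--
-- Line = namedtuple('Line', ('source', 'lineno', 'start', 'end'))
--
-- def split_source_lines(source):
--     """
--     Split source string into a list of ``Line`` objects. They contain
--     contextual information like line number, start position, end position.
--     """
--     lines = source.splitlines(True)
--     start = 0
--     annotated_lines = []
--     for i, line in enumerate(lines):
--         # Windows line endings end with '\r\n'.
--         if line.endswith('\r\n'):
--             ending_length = 2
--         # In case of '\n' or '\r' ending the line.
--         else:
--             ending_length = 1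
--         end = start + len(line)
--         annotated_lines.append(Line(
--             # Don't include line endings in snippet source.
--             source=line[:-ending_length],
--             lineno=i + 1,
--             start=start,
--             end=end))
--         start = end
--     return annotated_lines
-- ===== SOURCE B (Python) =====
-- from collections import namedtuple
--
-- Line = namedtuple('Line', ('source', 'lineno', 'start', 'end'))
--
-- def split_source_lines(source):
--     """
--     Prefix-offset table first, then a shaped annotation pass:
--     compute cumulative end offsets of the kept-ends lines, derive
--     the starts, and build every Line in one zipped comprehension.
--     """
--     lines = source.splitlines(True)
--     ends = []
--     total = 0
--     for line in lines:
--         total += len(line)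
--         ends.append(total)
--     starts = [0] + ends[:-1]
--     return [
--         Line(source=line[:-(2 if line.endswith('\r\n') else 1)],
--              lineno=i, start=s, end=e)
--         for i, (line, (s, e)) in enumerate(zip(lines, zip(starts, ends)), 1)
--     ]
-- ===== Notes on version B (the rewrite author's own statement) =====
-- stated objective: alternative
-- what changed: Replaced the fused carry-forward loop (which threads the running start offset while building each Line) by a two-phase decomposition: first a prefix-sum table of end offsets (starts derived as [0]+ends[:-1]), then one zipped comprehension that annotates each line.
import Mathlib
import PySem

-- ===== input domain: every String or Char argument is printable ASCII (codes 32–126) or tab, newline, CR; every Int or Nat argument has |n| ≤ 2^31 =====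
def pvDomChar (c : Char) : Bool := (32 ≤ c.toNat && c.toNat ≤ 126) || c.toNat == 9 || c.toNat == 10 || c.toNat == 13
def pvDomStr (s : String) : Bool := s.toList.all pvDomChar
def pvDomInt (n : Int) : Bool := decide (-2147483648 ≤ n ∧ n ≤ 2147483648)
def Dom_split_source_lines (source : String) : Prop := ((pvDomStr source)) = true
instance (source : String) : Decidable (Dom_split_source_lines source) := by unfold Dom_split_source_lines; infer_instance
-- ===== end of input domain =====

-- B replaces A's fused carry-forward loop by a prefix-sum offset table followed by one
-- zipped annotation pass; same return value everywhere (objective: alternative decomposition).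

-- ===== PORT A =====

-- Port of Python's source.splitlines(True) (keepends). Exact on the ASCII domain,
-- where the only line-break characters are '\n', '\r' and the pair '\r\n'.
def pySplitlinesKeep : List Char → List (List Char)
  | [] => []
  | '\n' :: cs => ['\n'] :: pySplitlinesKeep cs
  | '\r' :: '\n' :: cs => ['\r', '\n'] :: pySplitlinesKeep cs
  | '\r' :: cs => ['\r'] :: pySplitlinesKeep cs
  | c :: cs =>
    match pySplitlinesKeep cs with
    | [] => [[c]]
    | l :: ls => (c :: l) :: ls

-- A's loop: carries the running start offset and the line index forward.
def splitGoA : List (List Char) → Nat → Int → List (String × Int × Int × Int)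
  | [], _, _ => []
  | line :: rest, i, start =>
    let endingLength : Int := if PySem.Chars.endswith line ['\r', '\n'] then 2 else 1
    let e : Int := start + line.length
    (String.ofList (PySem.List.slice line none (some (-endingLength))), (i : Int) + 1, start, e)
      :: splitGoA rest (i + 1) e

def split_source_lines (source : String) : List (String × Int × Int × Int) :=
  splitGoA (pySplitlinesKeep source.toList) 0 0

-- ===== PORT B =====

-- prefix sums of the line lengths (Source B's `ends` loop)
def prefixEnds : Int → List Int → List Int
  | _, [] => []
  | total, x :: xs => (total + x) :: prefixEnds (total + x) xs

def split_source_lines_alt (source : String) : List (String × Int × Int × Int) :=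
  let lines := pySplitlinesKeep source.toList
  let ends := prefixEnds 0 (lines.map fun l => (l.length : Int))
  let starts := (0 : Int) :: ends.dropLast
  ((lines.zip (starts.zip ends)).zipIdx 1).map fun p =>
    (String.ofList (PySem.List.slice p.1.1 none
        (some (-(if PySem.Chars.endswith p.1.1 ['\r', '\n'] then (2 : Int) else 1)))),
     (p.2 : Int), p.1.2.1, p.1.2.2)

-- ===== PRECONDITION & SPEC =====
def Spec_split_source_lines (source : String) (out : List (String × Int × Int × Int)) : Prop := out = split_source_lines_alt source
instance (source : String) (out : List (String × Int × Int × Int)) : Decidable (Spec_split_source_lines source out) := by unfold Spec_split_source_lines; infer_instance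

-- ===== CLAIM (what is proved, stated in full; the proofs are below) =====
def Claim_equal_split_source_lines : Prop := ∀ (source : String), Dom_split_source_lines source → Spec_split_source_lines source (split_source_lines source)

-- ===== LEMMAS AND PROOFS =====

-- Loop ↔ prefix-table correspondence, generalised over the carried start offset and index.
theorem splitGoA_eq_zip : ∀ (lines : List (List Char)) (start : Int) (i : Nat),
    splitGoA lines i start =
      ((lines.zip (((start :: (prefixEnds start (lines.map fun l => (l.length : Int))).dropLast)).zip
          (prefixEnds start (lines.map fun l => (l.length : Int))))).zipIdx (i + 1)).map
        (fun p =>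
          (String.ofList (PySem.List.slice p.1.1 none
              (some (-(if PySem.Chars.endswith p.1.1 ['\r', '\n'] then (2 : Int) else 1)))),
           (p.2 : Int), p.1.2.1, p.1.2.2)) := by
  intro lines
  induction lines with
  | nil => intro start i; simp [splitGoA, prefixEnds]
  | cons line rest ih =>
    intro start i
    cases rest with
    | nil =>
      simp [splitGoA, prefixEnds, List.zipIdx]
    | cons r rs =>
      have htail := ih (start + (line.length : Int)) (i + 1)
      simp only [splitGoA, List.map_cons, prefixEnds, List.dropLast_cons₂,
        List.zip_cons_cons, List.zipIdx_cons, List.map_cons] at htail ⊢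
      rw [htail]; push_cast; ring_nf

theorem split_source_lines_spec_aux (source : String) :
    split_source_lines source = split_source_lines_alt source := by
  unfold split_source_lines split_source_lines_alt
  exact splitGoA_eq_zip (pySplitlinesKeep source.toList) 0 0

-- ===== VERDICT (by name: the statement is the Claim_ definition above) =====
theorem split_source_lines_spec : Claim_equal_split_source_lines := by
  intro source _
  exact split_source_lines_spec_aux source
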